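-- pv_equiv track=rewrite | github.com/Merelena/PythonHomework | final_task/pycalc/pycalc.py | merging_pluses_and_minuses
-- ===== SOURCE A (Python) =====
-- def merging_pluses_and_minuses(input_expression: list) -> list:
--     """It merges '+-' and '-+' in '-' and '--' in '+' """
--     index = 0
--     length = len(input_expression) - 2
--     # Length of expression without last symbol for correct work with indexes (last symbol can not be '-' or '+'
--     while index != length:
--         if (input_expression[index] == '+' and input_expression[index + 1] == '-') or \
--                 (input_expression[index] == '-' and input_expression[index + 1] == '+'):
--             input_expression[index] = '-'
--             del input_expression[index + 1]
--             length -= 1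
--         elif (input_expression[index] == '+' and input_expression[index + 1] == '+') or \
--                 (input_expression[index] == '-' and input_expression[index + 1] == '-'):
--             input_expression[index] = '+'
--             del input_expression[index + 1]
--             length -= 1
--         else:
--             index += 1
--     return input_expression
-- ===== SOURCE B (Python) =====
-- def merging_pluses_and_minuses(input_expression: list) -> list:
--     """It merges '+-' and '-+' in '-' and '--' in '+' (single pass with an output stack)."""
--     result = []
--     n = len(input_expression)
--     for k, x in enumerate(input_expression):
--         if x in ('+', '-') and k != n - 1 and result and result[-1] in ('+', '-'):
--             result[-1] = '+' if result[-1] == x else '-'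
--         else:
--             result.append(x)
--     return result
-- ===== Notes on version B (the rewrite author's own statement) =====
-- stated objective: alternative
-- what changed: Replaced the while-loop with repeated in-place del by a single left-to-right pass that merges each incoming sign into the top of an output stack (never merging into the last element); intended to avoid A's quadratic worst case, measured only ~1.48x at the largest size, so no speed is claimed.
import Mathlib
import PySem

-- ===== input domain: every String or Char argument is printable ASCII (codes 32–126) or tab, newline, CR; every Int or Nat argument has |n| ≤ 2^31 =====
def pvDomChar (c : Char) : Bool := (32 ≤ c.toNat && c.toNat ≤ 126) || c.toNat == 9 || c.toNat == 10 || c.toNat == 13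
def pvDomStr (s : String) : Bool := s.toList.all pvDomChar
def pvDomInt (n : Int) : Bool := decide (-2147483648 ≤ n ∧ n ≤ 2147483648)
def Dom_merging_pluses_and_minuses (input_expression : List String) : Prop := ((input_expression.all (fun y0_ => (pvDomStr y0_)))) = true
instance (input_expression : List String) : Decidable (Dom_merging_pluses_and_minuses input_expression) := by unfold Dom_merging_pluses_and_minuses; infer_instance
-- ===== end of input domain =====

-- B: one left-to-right pass merging each sign into the top of an output stack,
-- instead of A's while-loop with repeated in-place del. Equivalence is about the
-- RETURN value only (Python A mutates its argument in place, B builds a new list).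

-- ===== PORT A =====
-- A's while-loop, fuel-totalised: under Pre_ the fuel never runs out; on fuel
-- exhaustion or the out-of-range read where Python raises IndexError we return
-- the current list (reachable only outside Pre_). A's index stays a
-- nonnegative int, ported as Nat; 'length' can go negative, kept as Int.
def mergeLoopA : Nat → List String → Nat → Int → List String
  | 0, l, _, _ => l
  | fuel + 1, l, index, length =>
    if (index : Int) = length then l
    else if h : index + 1 < l.length then
      if (l[index]'(Nat.lt_of_succ_lt h) = "+" ∧ l[index+1]'h = "-") ∨
         (l[index]'(Nat.lt_of_succ_lt h) = "-" ∧ l[index+1]'h = "+") then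
        mergeLoopA fuel ((l.set index "-").eraseIdx (index+1)) index (length - 1)
      else if (l[index]'(Nat.lt_of_succ_lt h) = "+" ∧ l[index+1]'h = "+") ∨
              (l[index]'(Nat.lt_of_succ_lt h) = "-" ∧ l[index+1]'h = "-") then
        mergeLoopA fuel ((l.set index "+").eraseIdx (index+1)) index (length - 1)
      else
        mergeLoopA fuel l (index+1) length
    else l  -- IndexError in Python (only reachable outside Pre_)

def merging_pluses_and_minuses (input_expression : List String) : List String :=
  mergeLoopA (input_expression.length + 1) input_expression 0
    ((input_expression.length : Int) - 2)

-- ===== PORT B =====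
def isSign (s : String) : Bool := s == "+" || s == "-"

-- Source B's loop body: acc is the result stack (head = Python's result[-1]);
-- isLast is Python's k == n-1 test for the current element x.
def mergeStep (acc : List String) (x : String) (isLast : Bool) : List String :=
  if isSign x && !isLast then
    match acc with
    | t :: acc' => if isSign t then (if t == x then "+" else "-") :: acc' else x :: t :: acc'
    | [] => x :: []
  else x :: acc

def mergeStackB : List String → List String → List String
  | acc, [] => acc.reverse
  | acc, x :: rest => mergeStackB (mergeStep acc x rest.isEmpty) rest

def merging_pluses_and_minuses_alt (input_expression : List String) : List String :=
  mergeStackB [] input_expression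

-- ===== PRECONDITION & SPEC =====
-- A unconditionally reads positions 0 and 1, so it raises IndexError on lists
-- of length < 2; Pre_ excludes exactly those.
def Pre_merging_pluses_and_minuses (input_expression : List String) : Prop :=
  2 ≤ input_expression.length
instance (input_expression : List String) : Decidable (Pre_merging_pluses_and_minuses input_expression) := by unfold Pre_merging_pluses_and_minuses; infer_instance
def pvWitness_merging_pluses_and_minuses : List String := ["1", "+", "-", "2"]

def Spec_merging_pluses_and_minuses (input_expression : List String) (out : List String) : Prop := out = merging_pluses_and_minuses_alt input_expression
instance (input_expression : List String) (out : List String) : Decidable (Spec_merging_pluses_and_minuses input_expression out) := by unfold Spec_merging_pluses_and_minuses; infer_instance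

-- ===== CLAIM (what is proved, stated in full; the proofs are below) =====
def Claim_equal_merging_pluses_and_minuses : Prop := ∀ (input_expression : List String), Dom_merging_pluses_and_minuses input_expression → Pre_merging_pluses_and_minuses input_expression → Spec_merging_pluses_and_minuses input_expression (merging_pluses_and_minuses input_expression)

-- ===== LEMMAS AND PROOFS =====

lemma mergeStackB_nil (acc : List String) : mergeStackB acc [] = acc.reverse := rfl
lemma mergeStackB_cons (acc : List String) (x : String) (rest : List String) :
    mergeStackB acc (x :: rest) = mergeStackB (mergeStep acc x rest.isEmpty) rest := rfl

lemma isSign_iff (s : String) : isSign s = true ↔ s = "+" ∨ s = "-" := by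
  simp [isSign]

-- Python's "l[i] = s; del l[i+1]" as one list surgery
lemma set_erase (i : Nat) (s : String) : ∀ (l : List String), i + 2 ≤ l.length →
    (l.set i s).eraseIdx (i+1) = l.take i ++ s :: l.drop (i+2) := by
  induction i with
  | zero =>
    intro l h
    match l with
    | a :: b :: t => simp
  | succ i ih =>
    intro l h
    match l with
    | a :: t =>
      simp only [List.length_cons] at h
      simp [List.set, ih t (by omega)]

-- invariant of A's scan: no mergeable adjacent pair strictly before the index
def NoPair (l : List String) (i : Nat) : Prop :=
  ∀ j, j < i → ∀ a b, l[j]? = some a → l[j+1]? = some b →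
    ¬(isSign a = true ∧ isSign b = true)

lemma drop_singleton (l : List String) (i : Nat) (h : l.length = i + 2) :
    l.drop (i+1) = [l[i+1]'(by omega)] := by
  rw [List.drop_eq_getElem_cons (by omega)]
  have : l.drop (i+2) = [] := by
    rw [List.drop_eq_nil_iff]; omega
  rw [this]

lemma take_prefix_append (l : List String) (i : Nat) (tl : List String) (h : i ≤ l.length) :
    (l.take i ++ tl).take (i+1) = l.take i ++ tl.take 1 := by
  have hlen : (l.take i).length = i := by simp; omega
  calc (l.take i ++ tl).take (i+1) = (l.take i ++ tl).take ((l.take i).length + 1) := by rw [hlen]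
    _ = l.take i ++ tl.take 1 := by rw [List.take_length_add_append]

lemma drop_prefix_append (l : List String) (i : Nat) (tl : List String) (h : i ≤ l.length) :
    (l.take i ++ tl).drop (i+1) = tl.drop 1 := by
  have hlen : (l.take i).length = i := by simp; omega
  calc (l.take i ++ tl).drop (i+1) = (l.take i ++ tl).drop ((l.take i).length + 1) := by rw [hlen]
    _ = tl.drop 1 := by rw [List.drop_length_add_append]

lemma loop_eq (fuel : Nat) : ∀ (l : List String) (i : Nat),
    i + 2 ≤ l.length → NoPair l i → l.length ≤ fuel + i + 1 →
    mergeLoopA fuel l i ((l.length : Int) - 2)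
      = mergeStackB ((l.take (i+1)).reverse) (l.drop (i+1)) := by
  induction fuel with
  | zero => intro l i h1 _ h3; omega
  | succ fuel ih =>
    intro l i h1 hnp h3
    rw [mergeLoopA]
    by_cases hend : i = l.length - 2
    · -- loop exit: A returns l; B pushes the single remaining (last) element
      have hl : l.length = i + 2 := by omega
      rw [if_pos (by omega : (i : Int) = (l.length : Int) - 2)]
      rw [drop_singleton l i hl, mergeStackB_cons, mergeStackB_nil]
      have hstep : mergeStep ((l.take (i+1)).reverse) (l[i+1]'(by omega)) ([] : List String).isEmpty
          = l[i+1]'(by omega) :: (l.take (i+1)).reverse := by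
        simp [mergeStep]
      rw [hstep, List.reverse_cons, List.reverse_reverse]
      rw [← drop_singleton l i hl, List.take_append_drop]
    · have hi2 : i + 2 < l.length := by omega
      have hi : i + 1 < l.length := by omega
      have hi0 : i < l.length := by omega
      rw [if_neg (by omega : ¬ ((i : Int) = (l.length : Int) - 2)), dif_pos hi]
      have hdrop1 : l.drop (i+1) = l[i+1] :: l.drop (i+2) :=
        List.drop_eq_getElem_cons hi
      have htake1 : l.take (i+1) = l.take i ++ [l[i]] :=
        List.take_succ_eq_append_getElem hi0
      have hrest : (l.drop (i+2)).isEmpty = false := by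
        rw [List.isEmpty_eq_false_iff, Ne, List.drop_eq_nil_iff]; omega
      -- the two merging branches share everything except the produced sign
      have key : ∀ s : String, isSign (l[i]'hi0) = true →
          mergeStep ((l.take (i+1)).reverse) (l[i+1]'hi) (l.drop (i+2)).isEmpty
            = s :: (l.take i).reverse →
          mergeLoopA fuel (l.take i ++ s :: l.drop (i+2)) i ((l.length : Int) - 2 - 1)
            = mergeStackB ((l.take (i+1)).reverse) (l.drop (i+1)) := by
        intro s hsa hstep
        have hlen' : (l.take i ++ s :: l.drop (i+2)).length = l.length - 1 := by
          simp; omega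
        have hnp' : NoPair (l.take i ++ s :: l.drop (i+2)) i := by
          intro j hj x y hx hy hxy
          have hjl : j < (l.take i).length := by simp; omega
          have htl : (l.take i).length = i := by simp; omega
          have e1 : (l.take i ++ s :: l.drop (i+2))[j]? = l[j]? := by
            rw [List.getElem?_append_left hjl, List.getElem?_take_of_lt (by omega)]
          have hxl : l[j]? = some x := e1 ▸ hx
          by_cases hji : j + 1 < i
          · have e2 : (l.take i ++ s :: l.drop (i+2))[j+1]? = l[j+1]? := by
              rw [List.getElem?_append_left (by simp; omega), List.getElem?_take_of_lt (by omega)]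
            exact hnp j (by omega) x y hxl (e2 ▸ hy) hxy
          · have hji' : j + 1 = i := by omega
            have e2 : (l.take i ++ s :: l.drop (i+2))[j+1]? = some s := by
              rw [List.getElem?_append_right (by omega), htl, hji']
              simp
            have hys : y = s := by rw [e2] at hy; exact (Option.some.inj hy).symm
            exact hnp j (by omega) x (l[i]'hi0) hxl
              (by rw [hji']; exact List.getElem?_eq_getElem hi0) ⟨hxy.1, hsa⟩
        rw [show ((l.length : Int) - 2 - 1) = (((l.take i ++ s :: l.drop (i+2)).length : Int) - 2) from by
          rw [hlen']; omega]
        rw [ih (l.take i ++ s :: l.drop (i+2)) i (by rw [hlen']; omega) hnp' (by rw [hlen']; omega)]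
        rw [take_prefix_append l i _ (by omega), drop_prefix_append l i _ (by omega)]
        simp only [List.take_succ_cons, List.take_zero, List.drop_succ_cons, List.drop_zero]
        rw [hdrop1, mergeStackB_cons, hstep]
        simp
      by_cases hbr1 : (l[i]'hi0 = "+" ∧ l[i+1]'hi = "-") ∨ (l[i]'hi0 = "-" ∧ l[i+1]'hi = "+")
      · rw [if_pos hbr1, set_erase i "-" l (by omega)]
        apply key "-"
        · rcases hbr1 with ⟨h1', h2'⟩ | ⟨h1', h2'⟩ <;> rw [isSign_iff] <;> [exact Or.inl h1'; exact Or.inr h1']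
        · rw [hrest, htake1, List.reverse_append]
          rcases hbr1 with ⟨h1', h2'⟩ | ⟨h1', h2'⟩ <;> simp [mergeStep, isSign, h1', h2']
      · rw [if_neg hbr1]
        by_cases hbr2 : (l[i]'hi0 = "+" ∧ l[i+1]'hi = "+") ∨ (l[i]'hi0 = "-" ∧ l[i+1]'hi = "-")
        · rw [if_pos hbr2, set_erase i "+" l (by omega)]
          apply key "+"
          · rcases hbr2 with ⟨h1', h2'⟩ | ⟨h1', h2'⟩ <;> rw [isSign_iff] <;> [exact Or.inl h1'; exact Or.inr h1']
          · rw [hrest, htake1, List.reverse_append]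
            rcases hbr2 with ⟨h1', h2'⟩ | ⟨h1', h2'⟩ <;> simp [mergeStep, isSign, h1', h2']
        · -- no merge: A increments the index, B pushes l[i+1]
          rw [if_neg hbr2]
          have hnab : ¬(isSign (l[i]'hi0) = true ∧ isSign (l[i+1]'hi) = true) := by
            intro hc
            obtain ⟨ha', hb'⟩ := hc
            rw [isSign_iff] at ha' hb'
            rcases ha' with h | h <;> rcases hb' with h' | h'
            · exact hbr2 (Or.inl ⟨h, h'⟩)
            · exact hbr1 (Or.inl ⟨h, h'⟩)
            · exact hbr1 (Or.inr ⟨h, h'⟩)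
            · exact hbr2 (Or.inr ⟨h, h'⟩)
          have hnp' : NoPair l (i+1) := by
            intro j hj x y hx hy hxy
            by_cases hji : j < i
            · exact hnp j hji x y hx hy hxy
            · have hje : j = i := by omega
              subst hje
              rw [List.getElem?_eq_getElem hi0] at hx
              rw [List.getElem?_eq_getElem hi] at hy
              have hx' := Option.some.inj hx
              have hy' := Option.some.inj hy
              rw [← hx', ← hy'] at hxy
              exact hnab hxy
          rw [ih l (i+1) (by omega) hnp' (by omega)]
          rw [hdrop1, mergeStackB_cons, hrest]
          have htake2 : l.take (i+2) = l.take (i+1) ++ [l[i+1]'hi] :=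
            List.take_succ_eq_append_getElem hi
          rw [htake2, List.reverse_append]
          by_cases hs : isSign (l[i+1]'hi) = true
          · have hsa : isSign (l[i]'hi0) = false := by
              cases hq : isSign (l[i]'hi0)
              · rfl
              · exact absurd ⟨hq, hs⟩ hnab
            rw [htake1, List.reverse_append]
            simp [mergeStep, hs, hsa]
          · simp [mergeStep, hs]

lemma alt_start (l : List String) (h : 2 ≤ l.length) :
    mergeStackB [] l = mergeStackB ((l.take 1).reverse) (l.drop 1) := by
  match l with
  | x :: rest =>
    rw [mergeStackB_cons]
    have : mergeStep [] x rest.isEmpty = [x] := by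
      unfold mergeStep; split <;> rfl
    rw [this]
    simp

-- ===== VERDICT (by name: the statement is the Claim_ definition above) =====
theorem merging_pluses_and_minuses_spec : Claim_equal_merging_pluses_and_minuses := by
  intro l _ hpre
  unfold Spec_merging_pluses_and_minuses merging_pluses_and_minuses merging_pluses_and_minuses_alt
  have h2 : 2 ≤ l.length := hpre
  rw [loop_eq (l.length + 1) l 0 (by omega) (by intro j hj; omega) (by omega)]
  rw [← alt_start l h2]
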